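-- pv_equiv track=rewrite | github.com/rossmmurray/HackerRank | FarTest/q3.py | arrDecoded
-- ===== SOURCE A (Python) =====
-- def arrDecoded(numberOfRows, encodedString):
--
--     # put array into 2d array splitting by len(encodedString) / noRows (assume division has no remainder)
--     splitIndex = len(encodedString) // numberOfRows
--     rowedString = []
--     for i in range(numberOfRows):
--         rowedString.append(encodedString[i * splitIndex : (i + 1) * splitIndex ])
--
--     # loop through height and width of 2d array
--     arrDecoded = []
--     firstCol = 0
--     row = 0
--     while firstCol < len(rowedString[0]):
--         row = 0
--         col = firstCol
--         while row < len(rowedString):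
--             if col >= len(rowedString[0]):
--                 break
--
--             # change underscores to spaces
--             if rowedString[row][col] == '_':
--                 arrDecoded.append(' ')
--             else:
--                 arrDecoded.append(rowedString[row][col])
--
--             # diagonal down right
--             row += 1
--             col += 1
--
--         # move col pointer on row 0 along 1 space
--         firstCol += 1
--
--     stringDecoded = ''.join(arrDecoded)
--     return stringDecoded
-- ===== SOURCE B (Python) =====
-- def arrDecoded(numberOfRows, encodedString):
--     # Scatter: one pass over the flat string in source (row-major) order; each
--     # character's output position is computed from precomputed diagonal offsets.
--     splitIndex = len(encodedString) // numberOfRows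
--     offsets = []          # offsets[d] = start of diagonal d in the output
--     total = 0
--     for j in range(splitIndex):
--         offsets.append(total)
--         total += min(numberOfRows, splitIndex - j)
--     out = [' '] * total
--     for i in range(numberOfRows * splitIndex):
--         row, col = divmod(i, splitIndex)
--         if row <= col:
--             ch = encodedString[i]
--             out[offsets[col - row] + row] = ' ' if ch == '_' else ch
--     return ''.join(out)
-- ===== Notes on version B (the rewrite author's own statement) =====
-- stated objective: alternative
-- what changed: B inverts the traversal: instead of A's gather over diagonals of a prebuilt 2D row list (outer loop over start columns, inner break-on-bounds walk down-right), B makes one pass over the flat string in source row-major order and SCATTERS each kept character into a preallocated output buffer at a position computed from precomputed per-diagonal offsets (a prefix-sum of closed-form diagonal lengths).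
import Mathlib
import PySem

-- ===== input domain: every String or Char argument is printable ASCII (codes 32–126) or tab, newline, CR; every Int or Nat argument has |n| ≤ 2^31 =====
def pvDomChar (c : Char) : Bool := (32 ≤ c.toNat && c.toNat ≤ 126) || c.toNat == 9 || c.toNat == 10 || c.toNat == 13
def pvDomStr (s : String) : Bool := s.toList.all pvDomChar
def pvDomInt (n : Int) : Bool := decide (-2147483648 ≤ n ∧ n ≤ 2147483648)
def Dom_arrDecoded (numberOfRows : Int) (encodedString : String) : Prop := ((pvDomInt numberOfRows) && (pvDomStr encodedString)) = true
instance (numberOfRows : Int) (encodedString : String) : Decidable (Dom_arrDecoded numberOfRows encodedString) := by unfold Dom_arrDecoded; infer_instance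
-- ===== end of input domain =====

-- B inverts A's traversal: one pass over the flat string in source (row-major) order that
-- SCATTERS each kept character into a preallocated buffer at a position computed from a
-- prefix-sum of diagonal lengths, instead of A's gather over diagonals of a 2D row list
-- (objective: alternative).

-- ===== PORT A =====
-- inner 'while row < len(rowedString)' loop: recursion over the remaining rows,
-- the 'if col >= len(rowedString[0]): break' is the first branch (w = len(rowedString[0]))
def pvInnerA (rows : List (List Char)) (w : Int) (col : Int) (acc : List Char) : List Char :=
  match rows with
  | [] => acc
  | r :: rest =>
    if w ≤ col then acc
    else
      let c := PySem.List.pyGetD r col ' '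
      pvInnerA rest w (col + 1) (acc ++ [if c = '_' then ' ' else c])

def arrDecoded (numberOfRows : Int) (encodedString : String) : String :=
  let s := encodedString.toList
  let split := PySem.Int.floordiv (s.length : Int) numberOfRows
  let rowed := (PySem.List.pyRange 0 numberOfRows 1).map
      (fun i => PySem.List.slice s (some (i * split)) (some ((i + 1) * split)))
  -- rowedString[0]: A raises IndexError when rowed = [] (excluded by Pre_); len is constant in the loop
  let w := ((rowed.getD 0 []).length : Int)
  -- 'while firstCol < len(rowedString[0])': firstCol steps 0,1,… up to that constant bound
  let out := (PySem.List.pyRange 0 w 1).foldl (fun acc fc => pvInnerA rowed w fc acc) []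
  String.mk out

-- ===== PORT B =====
def arrDecoded_alt (numberOfRows : Int) (encodedString : String) : String :=
  let s := encodedString.toList
  let split := PySem.Int.floordiv (s.length : Int) numberOfRows
  -- offsets/total: running prefix-sum loop over range(split)
  let st := (PySem.List.pyRange 0 split 1).foldl
      (fun (st : List Int × Int) j => (st.1 ++ [st.2], st.2 + min numberOfRows (split - j))) ([], 0)
  let offsets := st.1
  let total := st.2
  let out0 := List.replicate total.toNat ' '
  -- scatter pass; encodedString[i], offsets[col-row] and out[pos]=… are ported with the total
  -- pyGetD/pySetD forms: exact here because 0 ≤ i < numberOfRows*split ≤ len(s), 0 ≤ col-row < split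
  -- and 0 ≤ pos < total always hold on these loop iterations (proved below)
  let out := (PySem.List.pyRange 0 (numberOfRows * split) 1).foldl (fun out i =>
      let row := PySem.Int.floordiv i split
      let col := PySem.Int.mod i split
      if row ≤ col then
        let ch := PySem.List.pyGetD s i ' '
        PySem.List.pySetD out (PySem.List.pyGetD offsets (col - row) 0 + row)
          (if ch = '_' then ' ' else ch)
      else out) out0
  String.mk out

-- ===== PRECONDITION & SPEC =====
-- Pre_: numberOfRows ≥ 1 — exactly where A returns (numberOfRows = 0 raises ZeroDivisionError,
-- numberOfRows < 0 raises IndexError on rowedString[0]).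
def Pre_arrDecoded (numberOfRows : Int) (encodedString : String) : Prop := 1 ≤ numberOfRows
instance (numberOfRows : Int) (encodedString : String) : Decidable (Pre_arrDecoded numberOfRows encodedString) := by unfold Pre_arrDecoded; infer_instance
def pvWitness_arrDecoded : Int × String := (3, "mea_tse__et_erc")

def Spec_arrDecoded (numberOfRows : Int) (encodedString : String) (out : String) : Prop := out = arrDecoded_alt numberOfRows encodedString
instance (numberOfRows : Int) (encodedString : String) (out : String) : Decidable (Spec_arrDecoded numberOfRows encodedString out) := by unfold Spec_arrDecoded; infer_instance

-- ===== CLAIM (what is proved, stated in full; the proofs are below) =====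
def Claim_equal_arrDecoded : Prop := ∀ (numberOfRows : Int) (encodedString : String), Dom_arrDecoded numberOfRows encodedString → Pre_arrDecoded numberOfRows encodedString → Spec_arrDecoded numberOfRows encodedString (arrDecoded numberOfRows encodedString)

-- ===== LEMMAS AND PROOFS =====

def pvTr (c : Char) : Char := if c = '_' then ' ' else c
def pvL (n m d : Nat) : Nat := min n (m - d)
def pvBlock (s : List Char) (n m d : Nat) : List Char :=
  (List.range (pvL n m d)).map (fun r => pvTr (s.getD (d + r * (m + 1)) ' '))
def pvCanon (s : List Char) (nR m : Nat) : List Char :=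
  (List.range m).foldl (fun acc fc =>
    acc ++ (List.range (min nR (m - fc))).map (fun row => pvTr (s.getD (fc + row * (m + 1)) ' '))) []
def pvS (n m d : Nat) : Nat := ((List.range d).map (pvL n m)).sum

lemma pvCanon_eq_flatten (s : List Char) (n m : Nat) :
    pvCanon s n m = ((List.range m).map (pvBlock s n m)).flatten := by
  unfold pvCanon
  rw [PySem.List.foldl_append_eq_flatMap]
  simp only [List.nil_append, List.flatMap_def]
  unfold pvBlock pvL
  simp [List.getD]

-- scatter fold preserves length
lemma pvScatter_len {ι : Type} (l : List ι) (P : ι → Prop) [DecidablePred P] (pos : ι → Nat)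
    (T : List Char) (o0 : List Char) :
    (l.foldl (fun o i => if P i then o.set (pos i) (T.getD (pos i) ' ') else o) o0).length
      = o0.length := by
  induction l generalizing o0 with
  | nil => rfl
  | cons i l ih =>
    simp only [List.foldl_cons]
    rw [ih]
    split_ifs <;> simp

lemma pvScatter_getD {ι : Type} (l : List ι) (P : ι → Prop) [DecidablePred P] (pos : ι → Nat)
    (T : List Char) (o0 : List Char) (h0 : o0.length = T.length)
    (hpos : ∀ i ∈ l, P i → pos i < T.length) (p : Nat) :
    (l.foldl (fun o i => if P i then o.set (pos i) (T.getD (pos i) ' ') else o) o0).getD p ' '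
      = if ∃ i ∈ l, P i ∧ pos i = p then T.getD p ' ' else o0.getD p ' ' := by
  induction l generalizing o0 with
  | nil => simp
  | cons i l ih =>
    simp only [List.foldl_cons]
    rw [ih _ (by split_ifs <;> simp [h0]) (fun j hj hPj => hpos j (List.mem_cons_of_mem _ hj) hPj)]
    by_cases hex : ∃ j ∈ l, P j ∧ pos j = p
    · rw [if_pos hex, if_pos ⟨_, List.mem_cons_of_mem _ hex.choose_spec.1, hex.choose_spec.2⟩]
    · rw [if_neg hex]
      by_cases hPi : P i
      · by_cases hpi : pos i = p
        · have hlt : pos i < o0.length := h0 ▸ hpos i (List.mem_cons_self) hPi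
          rw [if_pos hPi, if_pos ⟨i, List.mem_cons_self, hPi, hpi⟩]
          subst hpi
          rw [List.getD_eq_getElem _ _ (by simpa using hlt)]
          simp [List.getElem_set_self (h := by simpa using hlt)]
        · rw [if_pos hPi, if_neg (by
            rintro ⟨j, hj, hPj, hpj⟩
            rcases List.mem_cons.mp hj with rfl | hj
            · exact hpi hpj
            · exact hex ⟨j, hj, hPj, hpj⟩)]
          rcases Nat.lt_or_ge p o0.length with hp | hp
          · rw [List.getD_eq_getElem _ _ (by simpa using hp),
              List.getD_eq_getElem _ _ hp, List.getElem_set_ne (by omega)]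
          · rw [List.getD_eq_default _ _ (by simpa using hp), List.getD_eq_default _ _ hp]
      · rw [if_neg hPi, if_neg (by
          rintro ⟨j, hj, hPj, hpj⟩
          rcases List.mem_cons.mp hj with rfl | hj
          · exact hPi hPj
          · exact hex ⟨j, hj, hPj, hpj⟩)]

-- decomposition of an index below a sum of lengths
lemma pvDecomp (f : Nat → Nat) (m p : Nat) (hp : p < ((List.range m).map f).sum) :
    ∃ d r, d < m ∧ r < f d ∧ p = ((List.range d).map f).sum + r := by
  induction m with
  | zero => simp at hp
  | succ m ih =>
    rw [List.range_succ, List.map_append, List.sum_append] at hp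
    rcases Nat.lt_or_ge p ((List.range m).map f).sum with h | h
    · obtain ⟨d, r, h1, h2, h3⟩ := ih h
      exact ⟨d, r, Nat.lt_succ_of_lt h1, h2, h3⟩
    · refine ⟨m, p - ((List.range m).map f).sum, Nat.lt_succ_self m, ?_, by omega⟩
      simp at hp; omega

-- getD of a flatten at a block-offset position
lemma pvFlattenGet (B : List (List Char)) (d r : Nat) (hd : d < B.length)
    (hr : r < (B.getD d []).length) :
    B.flatten.getD (((B.take d).map List.length).sum + r) ' ' = (B.getD d []).getD r ' ' := by
  induction B generalizing d with
  | nil => simp at hd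
  | cons b B ih =>
    cases d with
    | zero =>
      simp only [List.getD_cons_zero] at hr ⊢
      simp only [List.take_zero, List.map_nil, List.sum_nil, Nat.zero_add, List.flatten_cons]
      rw [List.getD_append _ _ _ _ hr]
    | succ d =>
      simp only [List.getD_cons_succ] at hr ⊢
      simp only [List.take_succ_cons, List.map_cons, List.sum_cons, List.flatten_cons]
      rw [Nat.add_assoc, List.getD_append_right _ _ _ _ (Nat.le_add_right _ _)]
      rw [Nat.add_sub_cancel_left]
      exact ih d (by simpa using hd) hr

lemma pvS_succ (n m d : Nat) : pvS n m (d + 1) = pvS n m d + pvL n m d := by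
  simp [pvS, List.range_succ]

lemma pvS_mono (n m : Nat) {d e : Nat} (h : d ≤ e) : pvS n m d ≤ pvS n m e := by
  induction e with
  | zero => have : d = 0 := by omega
            subst this; exact le_refl _
  | succ e ih =>
    rcases Nat.lt_or_ge d (e + 1) with h' | h'
    · have := ih (by omega); rw [pvS_succ]; omega
    · have : d = e + 1 := by omega
      subst this; exact le_refl _

lemma pvOffFold (g : Int → Int) (m : Nat) :
    (PySem.List.pyRange 0 (m : Int) 1).foldl
      (fun (st : List Int × Int) j => (st.1 ++ [st.2], st.2 + g j)) ([], 0)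
    = ((List.range m).map (fun d => ((List.range d).map (fun t : Nat => g t)).sum),
       ((List.range m).map (fun t : Nat => g t)).sum) := by
  induction m with
  | zero => simp [PySem.List.pyRange_one_eq_nil (by omega : (0:Int) ≤ 0)]
  | succ m ih =>
    rw [show ((m + 1 : Nat) : Int) = (m : Int) + 1 by push_cast; ring,
      PySem.List.pyRange_one_succ_right (by positivity), List.foldl_append, ih]
    simp [List.range_succ]


lemma pvInnerA_spec (rows : List (List Char)) (w col : Int) (acc : List Char) :
    pvInnerA rows w col acc =
      acc ++ (List.range (min rows.length (w - col).toNat)).map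
        (fun k => pvTr (PySem.List.pyGetD (rows.getD k []) (col + (k : Int)) ' ')) := by
  induction rows generalizing col acc with
  | nil => simp [pvInnerA]
  | cons r rest ih =>
    by_cases h : w ≤ col
    · simp [pvInnerA, h, (by omega : (w - col).toNat = 0)]
    · rw [pvInnerA]
      simp only [if_neg h]
      rw [ih]
      have hm : min (r :: rest).length (w - col).toNat
          = min rest.length (w - col - 1).toNat + 1 := by
        simp only [List.length_cons]; omega
      rw [hm, List.range_succ_eq_map, List.map_cons, List.map_map,
        (by ring : w - (col + 1) = w - col - 1)]
      simp only [List.append_assoc, List.singleton_append]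
      congr 1
      congr 1
      · simp [pvTr]
      · apply List.map_congr_left
        intro k _
        simp only [Function.comp_apply, List.getD_cons_succ]
        congr 2
        push_cast; ring

lemma pvElem_eq (s : List Char) (m k fc : Nat) (hfk : fc + k < m) (hks : k * m + m ≤ s.length) :
    ((s.drop (k * m)).take m).getD (fc + k) ' ' = s.getD (fc + k * (m + 1)) ' ' := by
  have hkk : k * (m + 1) = k * m + k := by ring
  have h1 : fc + k < ((s.drop (k * m)).take m).length := by
    rw [List.length_take, List.length_drop]; omega
  rw [List.getD_eq_getElem _ _ h1, List.getD_eq_getElem _ _ (by omega : fc + k * (m + 1) < s.length)]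
  rw [List.getElem_take, List.getElem_drop]
  congr 1
  ring

lemma pvA_eq_canon (nR : Int) (str : String) (h : 1 ≤ nR) :
    arrDecoded nR str
      = String.mk (pvCanon str.toList nR.toNat
          (PySem.Int.floordiv (str.toList.length : Int) nR).toNat) := by
  set s := str.toList with hs
  set nRn := nR.toNat with hnRn
  have hnR : nR = (nRn : Int) := by omega
  set sp := PySem.Int.floordiv (s.length : Int) nR with hsp
  have hsp0 : 0 ≤ sp := by
    rw [hsp, PySem.Int.floordiv_eq_ediv_of_pos (by omega)]
    exact Int.ediv_nonneg (by positivity) (by omega)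
  set m := sp.toNat with hmm
  have hspm : sp = (m : Int) := by omega
  have hLb : (nRn : Nat) * m ≤ s.length := by
    have := PySem.Int.floordiv_mul_add_mod (s.length : Int) nR
    have hmn := PySem.Int.mod_nonneg (s.length : Int) (b := nR) (by omega)
    rw [← hsp] at this
    have : sp * nR ≤ (s.length : Int) := by omega
    rw [hspm, hnR] at this
    have h' : m * nRn ≤ s.length := by exact_mod_cast this
    rw [Nat.mul_comm]; exact h'
  have hnRn1 : 1 ≤ nRn := by omega
  have hmL : m ≤ s.length := le_trans (Nat.le_mul_of_pos_left m (by omega)) hLb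
  -- the row list
  have hrow : (PySem.List.pyRange 0 nR 1).map
      (fun i => PySem.List.slice s (some (i * sp)) (some ((i + 1) * sp)))
      = (List.range nRn).map (fun k => (s.drop (k * m)).take m) := by
    rw [PySem.List.pyRange_one, List.map_map, sub_zero, hnR, Int.toNat_natCast]
    apply List.map_congr_left
    intro k _
    simp only [Function.comp_apply, zero_add]
    have e1 : (k : Int) * sp = ((k * m : Nat) : Int) := by rw [hspm]; push_cast; ring
    have e2 : ((k : Int) + 1) * sp = ((k * m : Nat) : Int) + (m : Int) := by
      rw [hspm]; push_cast; ring
    rw [e1, e2, PySem.List.slice_natCast_add]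
  unfold arrDecoded
  simp only []
  rw [← hs, ← hsp, hrow]
  have hget : ∀ k : Nat, k < nRn →
      ((List.range nRn).map (fun k => (s.drop (k * m)).take m)).getD k []
        = (s.drop (k * m)).take m := by
    intro k hk
    rw [List.getD_eq_getElem _ _ (by simpa using hk)]
    simp
  have hw : (((List.range nRn).map (fun k => (s.drop (k * m)).take m)).getD 0 []).length = m := by
    rw [hget 0 hnRn1]
    rw [Nat.zero_mul, List.drop_zero, List.length_take]
    omega
  rw [hw]
  congr 1
  rw [PySem.List.pyRange_one, sub_zero, Int.toNat_natCast, List.foldl_map]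
  unfold pvCanon
  apply PySem.List.foldl_congr_mem
  intro acc fc hfc
  simp only [List.mem_range] at hfc
  rw [zero_add, pvInnerA_spec]
  congr 1
  rw [(by simp : (List.map (fun k => List.take m (List.drop (k * m) s)) (List.range nRn)).length = nRn),
    (by omega : ((m : Int) - (fc : Int)).toNat = m - fc)]
  apply List.map_congr_left
  intro k hk
  simp only [List.mem_range] at hk
  rw [hget k (by omega), (by push_cast; ring : ((fc : Int) + (k : Int)) = ((fc + k : Nat) : Int)),
    PySem.List.pyGetD_natCast]
  congr 1
  have h2 : (k + 1) * m = k * m + m := by ring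
  have h3 := Nat.mul_le_mul_right m (show k + 1 ≤ nRn by omega)
  exact pvElem_eq s m k fc (by omega) (by omega)

lemma pvB_eq_canon (nR : Int) (str : String) (h : 1 ≤ nR) :
    arrDecoded_alt nR str
      = String.mk (pvCanon str.toList nR.toNat
          (PySem.Int.floordiv (str.toList.length : Int) nR).toNat) := by
  set s := str.toList with hs
  set nRn := nR.toNat with hnRn
  have hnR : nR = (nRn : Int) := by omega
  set sp := PySem.Int.floordiv (s.length : Int) nR with hsp
  have hsp0 : 0 ≤ sp := by
    rw [hsp, PySem.Int.floordiv_eq_ediv_of_pos (by omega)]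
    exact Int.ediv_nonneg (by positivity) (by omega)
  set m := sp.toNat with hmm
  have hspm : sp = (m : Int) := by omega
  have hLb : nRn * m ≤ s.length := by
    have := PySem.Int.floordiv_mul_add_mod (s.length : Int) nR
    have hmn := PySem.Int.mod_nonneg (s.length : Int) (b := nR) (by omega)
    rw [← hsp] at this
    have : sp * nR ≤ (s.length : Int) := by omega
    rw [hspm, hnR] at this
    have h' : m * nRn ≤ s.length := by exact_mod_cast this
    rw [Nat.mul_comm]; exact h'
  have hnRn1 : 1 ≤ nRn := by omega
  clear_value s nRn sp m
  -- the canonical result and its blocks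
  set T := pvCanon s nRn m with hT
  set blocks := (List.range m).map (pvBlock s nRn m) with hblocks
  clear_value T blocks
  have hTflat : T = blocks.flatten := by rw [hT, hblocks]; exact pvCanon_eq_flatten s nRn m
  have hbd : ∀ d, d < m → blocks.getD d [] = pvBlock s nRn m d := by
    intro d hd
    rw [hblocks, List.getD_eq_getElem _ _ (by simpa using hd), List.getElem_map,
      List.getElem_range]
  have hblen : ∀ d, d < m → (blocks.getD d []).length = pvL nRn m d := by
    intro d hd
    rw [hbd d hd]
    simp [pvBlock]
  have hTlen : T.length = pvS nRn m m := by
    rw [hTflat, List.length_flatten, hblocks, List.map_map, pvS]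
    congr 1
    apply List.map_congr_left
    intro d _
    simp [pvBlock]
  have hTget : ∀ d r, d < m → r < pvL nRn m d →
      T.getD (pvS nRn m d + r) ' ' = pvTr (s.getD (d + r * (m + 1)) ' ') := by
    intro d r hd hr
    have h1 : d < blocks.length := by simp [hblocks]; omega
    have h2 := pvFlattenGet blocks d r h1 (by rw [hblen d hd]; exact hr)
    have hpre : ((blocks.take d).map List.length).sum = pvS nRn m d := by
      rw [hblocks, ← List.map_take, List.take_range, List.map_map,
        (by omega : min d m = d), pvS]
      congr 1
      apply List.map_congr_left
      intro t _
      simp [pvBlock]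
    rw [hpre] at h2
    rw [hTflat, h2, hbd d hd, pvBlock,
      List.getD_eq_getElem _ _ (by simpa using hr)]
    simp
  have hposlt : ∀ d r, d < m → r < pvL nRn m d → pvS nRn m d + r < pvS nRn m m := by
    intro d r hd hr
    have h1 : pvS nRn m d + r < pvS nRn m (d + 1) := by rw [pvS_succ]; omega
    have h2 := pvS_mono nRn m (show d + 1 ≤ m by omega)
    omega
  -- characterize the offsets/total fold
  have hgEq : ∀ d : Nat, d ≤ m →
      ((List.range d).map (fun t : Nat => min nR (sp - (t : Int)))).sum = (pvS nRn m d : Int) := by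
    intro d hd
    have he : (List.range d).map (fun t : Nat => min nR (sp - (t : Int)))
        = (List.range d).map (fun t : Nat => ((pvL nRn m t : Nat) : Int)) := by
      apply List.map_congr_left
      intro t ht
      simp only [List.mem_range] at ht
      rw [hnR, hspm, pvL]
      omega
    rw [he, pvS, Nat.cast_list_sum, List.map_map]
    rfl
  have hoff := pvOffFold (fun j => min nR (sp - j)) m
  -- the scatter predicate and position function
  set Pp : Int → Prop := fun i => PySem.Int.floordiv i sp ≤ PySem.Int.mod i sp with hPp
  set posF : Int → Nat := fun i =>
    pvS nRn m ((PySem.Int.mod i sp - PySem.Int.floordiv i sp)).toNat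
      + (PySem.Int.floordiv i sp).toNat with hposF
  -- facts on each loop index
  have hIdx : ∀ i : Int, 0 ≤ i → i < nR * sp →
      PySem.Int.floordiv i sp = ((i.toNat / m : Nat) : Int)
      ∧ PySem.Int.mod i sp = ((i.toNat % m : Nat) : Int)
      ∧ i.toNat < nRn * m ∧ 0 < m := by
    intro i h0 hi
    have hm1 : 0 < m := by
      by_contra hm
      have hm0 : m = 0 := by omega
      rw [hnR, hspm, hm0] at hi
      simp at hi
      omega
    have hiN : i = ((i.toNat : Nat) : Int) := by omega
    refine ⟨?_, ?_, ?_, hm1⟩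
    · rw [hspm, hiN, PySem.Int.floordiv_natCast]; simp
    · rw [hspm, hiN, PySem.Int.mod_natCast]; simp
    · have : i < ((nRn * m : Nat) : Int) := by rw [hnR, hspm] at hi; push_cast; omega
      omega
  have hposF_eval : ∀ i : Int, 0 ≤ i → i < nR * sp → i.toNat / m ≤ i.toNat % m →
      posF i = pvS nRn m (i.toNat % m - i.toNat / m) + i.toNat / m := by
    intro i h0 hi hrc
    obtain ⟨hfd, hmd, hlt, hm1⟩ := hIdx i h0 hi
    rw [hposF]
    simp only []
    rw [hfd, hmd, Int.toNat_sub, Int.toNat_natCast]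
  -- unfold the port and rewrite
  unfold arrDecoded_alt
  simp only []
  rw [← hs, ← hsp]
  rw [show (PySem.List.pyRange 0 sp 1) = (PySem.List.pyRange 0 ((m : Nat) : Int) 1) by rw [hspm]]
  rw [hoff]
  simp only []
  have htotal : ((List.range m).map (fun t : Nat => min nR (sp - (t : Int)))).sum.toNat
      = pvS nRn m m := by rw [hgEq m (le_refl m)]; omega
  rw [htotal]
  -- rewrite the scatter loop body into the canonical scatter shape
  rw [PySem.List.foldl_congr_mem _ _
      (fun o i => if Pp i then o.set (posF i) (T.getD (posF i) ' ') else o) _ ?_]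
  · -- conclude by the generic scatter lemmas
    congr 1
    have hl0 : (List.replicate (pvS nRn m m) ' ').length = T.length := by
      rw [List.length_replicate, hTlen]
    have hpos : ∀ i ∈ PySem.List.pyRange 0 (nR * sp) 1, Pp i → posF i < T.length := by
      intro i hi hPi
      rw [PySem.List.mem_pyRange_one] at hi
      obtain ⟨hfd, hmd, hlt, hm1⟩ := hIdx i hi.1 hi.2
      have hc : i.toNat % m < m := Nat.mod_lt _ hm1
      have hrn : i.toNat / m < nRn := Nat.div_lt_iff_lt_mul hm1 |>.mpr (by omega)
      have hPi' : PySem.Int.floordiv i sp ≤ PySem.Int.mod i sp := hPi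
      rw [hfd, hmd] at hPi'
      have hrc : i.toNat / m ≤ i.toNat % m := by exact_mod_cast hPi'
      have h9 : i.toNat % m - i.toNat / m + i.toNat / m = i.toNat % m := Nat.sub_add_cancel hrc
      rw [hposF_eval i hi.1 hi.2 hrc, hTlen]
      exact hposlt _ _ (lt_of_le_of_lt (Nat.sub_le _ _) hc) (by rw [pvL]; omega)
    apply List.ext_getElem
    · rw [pvScatter_len, List.length_replicate, hTlen]
    · intro k h1 h2
      rw [← List.getD_eq_getElem _ ' ' h1, ← List.getD_eq_getElem _ ' ' h2]
      have hk : k < pvS nRn m m := by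
        rw [pvScatter_len, List.length_replicate] at h1; exact h1
      obtain ⟨d, r, hd, hr, hkeq⟩ := pvDecomp (pvL nRn m) m k hk
      have hdr : d + r < m := by have := hr; rw [pvL] at this; omega
      have hrn : r < nRn := by have := hr; rw [pvL] at this; omega
      have hm1 : 0 < m := by omega
      -- the witness source index hitting output position k
      have e1 : ((d + r) + m * r) / m = r := by
        rw [Nat.add_mul_div_left _ _ hm1, Nat.div_eq_of_lt hdr]
        omega
      have e2 : ((d + r) + m * r) % m = d + r := by
        rw [Nat.add_mul_mod_self_left]
        exact Nat.mod_eq_of_lt hdr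
      have hiNlt : (d + r) + m * r < nRn * m := by
        have h6 : m * (r + 1) = m * r + m := by ring
        have h4 : m * (r + 1) ≤ m * nRn := Nat.mul_le_mul_left m (by omega)
        have h7 : m * nRn = nRn * m := Nat.mul_comm m nRn
        omega
      have hbnd : (((d + r) + m * r : Nat) : Int) < nR * sp := by
        rw [hnR, hspm]; exact_mod_cast hiNlt
      have hmem : (((d + r) + m * r : Nat) : Int) ∈ PySem.List.pyRange 0 (nR * sp) 1 := by
        rw [PySem.List.mem_pyRange_one]
        exact ⟨by positivity, hbnd⟩
      have hex : ∃ i ∈ PySem.List.pyRange 0 (nR * sp) 1, Pp i ∧ posF i = k := by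
        refine ⟨(((d + r) + m * r : Nat) : Int), hmem, ?_, ?_⟩
        · show PySem.Int.floordiv _ sp ≤ PySem.Int.mod _ sp
          rw [hspm, PySem.Int.floordiv_natCast, PySem.Int.mod_natCast, e1, e2]
          exact_mod_cast Nat.le_add_left r d
        · rw [hposF_eval _ (by positivity) hbnd
            (by rw [Int.toNat_natCast, e1, e2]; omega)]
          rw [Int.toNat_natCast, e1, e2, show d + r - r = d by omega, hkeq]
          rfl
      rw [pvScatter_getD _ Pp posF T _ hl0 hpos k, if_pos hex]
  · -- body equality on every loop index
    intro o i hi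
    simp only []
    rw [PySem.List.mem_pyRange_one] at hi
    obtain ⟨hfd, hmd, hlt, hm1⟩ := hIdx i hi.1 hi.2
    have hiI : i = ((i.toNat : Nat) : Int) := by omega
    have hc : i.toNat % m < m := Nat.mod_lt _ hm1
    have hrn : i.toNat / m < nRn := Nat.div_lt_iff_lt_mul hm1 |>.mpr (by omega)
    by_cases hcond : PySem.Int.floordiv i sp ≤ PySem.Int.mod i sp
    · rw [if_pos hcond, if_pos (show Pp i from hcond)]
      have hrc : i.toNat / m ≤ i.toNat % m := by
        rw [hfd, hmd] at hcond; exact_mod_cast hcond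
      have h9 : i.toNat % m - i.toNat / m + i.toNat / m = i.toNat % m := Nat.sub_add_cancel hrc
      have hdm : i.toNat % m - i.toNat / m < m := lt_of_le_of_lt (Nat.sub_le _ _) hc
      -- the offsets lookup
      have hoffget : PySem.List.pyGetD
          ((List.range m).map (fun d : Nat => ((List.range d).map
            (fun t : Nat => min nR (sp - (t : Int)))).sum))
          (PySem.Int.mod i sp - PySem.Int.floordiv i sp) 0
          = (pvS nRn m (i.toNat % m - i.toNat / m) : Int) := by
        rw [hmd, hfd, show ((i.toNat % m : Nat) : Int) - ((i.toNat / m : Nat) : Int)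
            = (((i.toNat % m - i.toNat / m) : Nat) : Int) by
              rw [← Int.toNat_sub]; omega,
          PySem.List.pyGetD_natCast]
        rw [List.getD_eq_getElem _ _ (by simpa using hdm), List.getElem_map,
          List.getElem_range]
        exact hgEq _ (by omega)
      rw [hoffget]
      have hpey : (pvS nRn m (i.toNat % m - i.toNat / m) : Int) + PySem.Int.floordiv i sp
          = (((pvS nRn m (i.toNat % m - i.toNat / m) + i.toNat / m : Nat)) : Int) := by
        rw [hfd]; push_cast; ring
      rw [hpey, PySem.List.pySetD_natCast]
      rw [hposF_eval i hi.1 hi.2 hrc]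
      congr 1
      -- the written value equals T at the target position
      rw [hTget (i.toNat % m - i.toNat / m) (i.toNat / m) hdm (by rw [pvL]; omega)]
      rw [show PySem.List.pyGetD s i ' ' = s.getD i.toNat ' ' from by
        conv_lhs => rw [hiI]
        rw [PySem.List.pyGetD_natCast]]
      rw [show (i.toNat % m - i.toNat / m) + (i.toNat / m) * (m + 1) = i.toNat by
        have h5 := Nat.div_add_mod i.toNat m
        have h8 : (i.toNat / m) * (m + 1) = m * (i.toNat / m) + i.toNat / m := by ring
        omega]
      simp [pvTr]
    · rw [if_neg hcond, if_neg (show ¬ Pp i from hcond)]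

-- ===== VERDICT (by name: the statement is the Claim_ definition above) =====
theorem arrDecoded_spec : Claim_equal_arrDecoded := by
  intro nR str _ hPre
  unfold Spec_arrDecoded
  rw [pvA_eq_canon nR str hPre, pvB_eq_canon nR str hPre]
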